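-- pv_equiv track=rewrite | github.com/hanguyen2019/Chopper-Control-Signal-Generator | ChoppersControlSignalGenerator.py | combineKeyIfTheValueSame
-- ===== SOURCE A (Python) =====
-- def combineKeyIfTheValueSame(d):
--     keys_values_list = [list(_) for _ in list(d.items())]
--     temp = keys_values_list[0]
--     idx = 1
--     length = len(keys_values_list)
--     while idx < length:
--         if keys_values_list[idx][1] == temp[1]:
--             keys_values_list.remove(keys_values_list[idx])
--             idx -= 1
--             length -= 1
--         else:
--             temp = keys_values_list[idx]
--         idx += 1
--     return dict(keys_values_list)
-- ===== SOURCE B (Python) =====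
-- def combineKeyIfTheValueSame(d):
--     out = {}
--     prev = object()  # sentinel: matches no dict value
--     for k, v in d.items():
--         if v != prev:
--             out[k] = v
--             prev = v
--     return out
-- ===== Notes on version B (the rewrite author's own statement) =====
-- stated objective: faster
-- what changed: Replaces the while-loop that repeatedly calls list.remove (an O(n) scan-and-shift per deleted entry) with a single forward pass that copies an entry only when its value differs from the previously kept value.
import Mathlib
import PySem

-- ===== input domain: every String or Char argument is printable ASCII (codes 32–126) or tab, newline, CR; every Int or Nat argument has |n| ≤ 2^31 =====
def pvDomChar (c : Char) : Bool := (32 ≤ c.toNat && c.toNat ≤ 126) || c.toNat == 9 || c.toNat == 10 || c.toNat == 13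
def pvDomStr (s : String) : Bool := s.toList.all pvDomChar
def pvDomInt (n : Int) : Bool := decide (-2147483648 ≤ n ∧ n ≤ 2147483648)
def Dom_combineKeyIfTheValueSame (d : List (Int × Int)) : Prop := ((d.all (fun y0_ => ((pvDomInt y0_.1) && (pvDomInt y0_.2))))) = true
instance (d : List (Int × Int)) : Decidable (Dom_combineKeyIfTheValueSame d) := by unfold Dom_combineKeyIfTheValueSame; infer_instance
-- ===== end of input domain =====

-- B replaces A's while-loop with repeated list.remove by a single forward pass that keeps an
-- entry only when its value differs from the previously kept value (objective: faster).

-- ===== PORT A =====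
-- termination helper for the port's while-loop (cited in decreasing_by)
theorem pvRemoveLen {α : Type} [BEq α] [LawfulBEq α] (xs l : List α) (v : α)
    (h : PySem.List.remove? xs v = some l) : l.length + 1 = xs.length := by
  have hv : v ∈ xs := by
    by_contra hv
    rw [(PySem.List.remove?_eq_none_iff xs v).mpr hv] at h
    simp at h
  rw [PySem.List.remove?_eq_some_erase xs v hv] at h
  cases h
  have h1 := List.length_erase_of_mem hv
  have h2 : 0 < xs.length := List.length_pos_of_mem hv
  omega

-- while idx < length: if kvs[idx][1] == temp[1]: kvs.remove(kvs[idx]); idx -= 1; length -= 1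
--                     else: temp = kvs[idx]
--                     idx += 1
def pvLoopA (kvs : List (Int × Int)) (temp : Int × Int) (idx : Nat) : List (Int × Int) :=
  if h : idx < kvs.length then
    let cur := kvs[idx]
    if cur.2 = temp.2 then
      match hrem : PySem.List.remove? kvs cur with
      | some l => pvLoopA l temp idx          -- idx -= 1 then idx += 1: unchanged
      | none => kvs                           -- unreachable: cur ∈ kvs
    else
      pvLoopA kvs cur (idx + 1)
  else kvs
termination_by kvs.length - idx
decreasing_by
  · have := pvRemoveLen kvs l _ hrem; omega
  · omega

def combineKeyIfTheValueSame (d : List (Int × Int)) : List (Int × Int) :=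
  match d with
  | [] => []                                  -- keys_values_list[0] raises IndexError: outside Pre_
  | t :: _ => (PySem.Dict.ofList (pvLoopA d t 1)).items

-- ===== PORT B =====
-- for k, v in d.items(): if v != prev: kept.append((k, v)); prev = v    — then dict(kept)
def combineKeyIfTheValueSame_alt (d : List (Int × Int)) : List (Int × Int) :=
  let kept := (d.foldl
    (fun (s : List (Int × Int) × Option Int) kv =>
      if some kv.2 ≠ s.2 then (s.1 ++ [kv], some kv.2) else s)
    ([], none)).1
  (PySem.Dict.ofList kept).items

-- ===== PRECONDITION & SPEC =====
-- Pre_ excludes the empty dict, on which A raises IndexError, and association lists with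
-- duplicate keys, which do not represent any Python dict input.
def Pre_combineKeyIfTheValueSame (d : List (Int × Int)) : Prop :=
  d ≠ [] ∧ (d.map Prod.fst).Nodup
instance (d : List (Int × Int)) : Decidable (Pre_combineKeyIfTheValueSame d) := by
  unfold Pre_combineKeyIfTheValueSame; infer_instance

def pvWitness_combineKeyIfTheValueSame : (List (Int × Int)) := [(1, 5), (2, 5), (3, 7)]

def Spec_combineKeyIfTheValueSame (d : List (Int × Int)) (out : List (Int × Int)) : Prop :=
  out = combineKeyIfTheValueSame_alt d
instance (d : List (Int × Int)) (out : List (Int × Int)) : Decidable (Spec_combineKeyIfTheValueSame d out) := by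
  unfold Spec_combineKeyIfTheValueSame; infer_instance

-- ===== CLAIM (what is proved, stated in full; the proofs are below) =====
def Claim_equal_combineKeyIfTheValueSame : Prop := ∀ (d : List (Int × Int)), Dom_combineKeyIfTheValueSame d → Pre_combineKeyIfTheValueSame d → Spec_combineKeyIfTheValueSame d (combineKeyIfTheValueSame d)

-- ===== LEMMAS AND PROOFS =====

-- proof-side collapse function: the common value both ports compute
def pvGo (prev : Option Int) : List (Int × Int) → List (Int × Int)
  | [] => []
  | (k, v) :: rs => if some v ≠ prev then (k, v) :: pvGo (some v) rs else pvGo prev rs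

theorem pvFoldB (rest : List (Int × Int)) (acc : List (Int × Int)) (prev : Option Int) :
    (rest.foldl
      (fun (s : List (Int × Int) × Option Int) kv =>
        if some kv.2 ≠ s.2 then (s.1 ++ [kv], some kv.2) else s)
      (acc, prev)).1 = acc ++ pvGo prev rest := by
  induction rest generalizing acc prev with
  | nil => simp [pvGo]
  | cons kv rs ih =>
    obtain ⟨k, v⟩ := kv
    rw [List.foldl_cons]
    by_cases h : some v = prev
    · have hstep : (if some (k, v).2 ≠ prev then (acc ++ [(k, v)], some (k, v).2) else (acc, prev))
          = (acc, prev) := by simp [h]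
      rw [hstep, ih]
      simp [pvGo, h]
    · have hstep : (if some (k, v).2 ≠ prev then (acc ++ [(k, v)], some (k, v).2) else (acc, prev))
          = (acc ++ [(k, v)], some v) := by simp [h]
      rw [hstep, ih]
      simp [pvGo, h]

theorem pvLoopA_eq (rest : List (Int × Int)) (done : List (Int × Int)) (temp : Int × Int)
    (hnd : ((done ++ rest).map Prod.fst).Nodup) :
    pvLoopA (done ++ rest) temp done.length = done ++ pvGo (some temp.2) rest := by
  induction rest generalizing done temp with
  | nil => rw [pvLoopA]; simp [pvGo]
  | cons kv rs ih =>
    obtain ⟨k, v⟩ := kv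
    have hlen : done.length < (done ++ (k, v) :: rs).length := by simp
    have hget : (done ++ (k, v) :: rs)[done.length]'hlen = (k, v) := by
      simp
    rw [pvLoopA]
    simp only [hlen, dif_pos, hget]
    by_cases hv : v = temp.2
    · -- remove branch: (k,v) does not occur in done (its key is fresh), so
      -- remove? deletes exactly the element at idx
      have hkv_mem : (k, v) ∈ done ++ (k, v) :: rs := by simp
      have hknd : k ∉ done.map Prod.fst := by
        simp only [List.map_append, List.map_cons, List.nodup_append] at hnd
        intro hmem
        exact hnd.2.2 k hmem k (by simp) rfl
      have hkv_done : (k, v) ∉ done := fun hm => hknd (List.mem_map_of_mem hm)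
      have herase : (done ++ (k, v) :: rs).erase (k, v) = done ++ rs := by
        rw [List.erase_append_right _ hkv_done, List.erase_cons_head]
      have hrem : PySem.List.remove? (done ++ (k, v) :: rs) (k, v) = some (done ++ rs) := by
        rw [PySem.List.remove?_eq_some_erase _ _ hkv_mem, herase]
      have hnd' : ((done ++ rs).map Prod.fst).Nodup := by
        refine List.Nodup.sublist ?_ hnd
        exact (List.append_sublist_append_left _).mpr (List.sublist_cons_self _ _) |>.map _
      simp only [if_pos hv]
      split
      · next l heq =>
          rw [hget, hrem] at heq
          cases heq
          rw [ih done temp hnd']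
          simp [pvGo, hv]
      · next heq => rw [hget, hrem] at heq; exact absurd heq (by simp)
    · have hnd'' : (((done ++ [(k, v)]) ++ rs).map Prod.fst).Nodup := by
        simpa using hnd
      simp only [if_neg hv]
      rw [show done ++ (k, v) :: rs = (done ++ [(k, v)]) ++ rs by simp,
          show done.length + 1 = (done ++ [(k, v)]).length by simp,
          ih (done ++ [(k, v)]) (k, v) hnd'']
      simp [pvGo, hv]

-- ===== VERDICT (by name: the statement is the Claim_ definition above) =====
theorem combineKeyIfTheValueSame_spec : Claim_equal_combineKeyIfTheValueSame := by
  intro d _ hpre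
  obtain ⟨hne, hnd⟩ := hpre
  unfold Spec_combineKeyIfTheValueSame
  match d with
  | [] => exact absurd rfl hne
  | (k, v) :: rest =>
    have hA : pvLoopA ((k, v) :: rest) (k, v) 1 = (k, v) :: pvGo (some v) rest := by
      have := pvLoopA_eq rest [(k, v)] (k, v) (by simpa using hnd)
      simpa using this
    have halt : combineKeyIfTheValueSame_alt ((k, v) :: rest)
        = (PySem.Dict.ofList (pvGo none ((k, v) :: rest))).items := by
      unfold combineKeyIfTheValueSame_alt
      simp only [pvFoldB ((k, v) :: rest) [] none, List.nil_append]
    have hAeq : combineKeyIfTheValueSame ((k, v) :: rest)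
        = (PySem.Dict.ofList (pvLoopA ((k, v) :: rest) (k, v) 1)).items := rfl
    have hgo : pvGo none ((k, v) :: rest) = (k, v) :: pvGo (some v) rest := by simp [pvGo]
    rw [hAeq, hA, halt, hgo]
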